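-- pv_equiv track=rewrite | github.com/jdbecerra/calendario_agroclimatico | app/api_cbr/cbr_cafe.py | combinar_recs_genericas
-- ===== SOURCE A (Python) =====
-- def combinar_recs_genericas(hits_dom):
--     """
--     Combina recomendaciones técnicas y tradicionales de k (Dataset A),
--     eliminando repeticiones textuales.
--     """
--     tecnicas = []
--     tradicionales = []
--     seen_t = set()
--     seen_trad = set()
--
--     for sim, case in hits_dom:
--         rec = case.get("recomendaciones") or {}
--         for t in rec.get("tecnicas") or []:
--             t = (t or "").strip()
--             if t and t not in seen_t:
--                 seen_t.add(t)
--                 tecnicas.append(t)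
--         for tr in rec.get("tradicionales") or []:
--             tr = (tr or "").strip()
--             if tr and tr not in seen_trad:
--                 seen_trad.add(tr)
--                 tradicionales.append(tr)
--
--     return {"tecnicas": tecnicas, "tradicionales": tradicionales}
-- ===== SOURCE B (Python) =====
-- def combinar_recs_genericas(hits_dom):
--     """
--     Combina recomendaciones tecnicas y tradicionales de k (Dataset A),
--     eliminando repeticiones textuales.
--     """
--     flat_t = [
--         s
--         for sim, case in hits_dom
--         for s in [(x or "").strip()
--                   for x in (case.get("recomendaciones") or {}).get("tecnicas") or []]
--         if s
--     ]
--     flat_tr = [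
--         s
--         for sim, case in hits_dom
--         for s in [(x or "").strip()
--                   for x in (case.get("recomendaciones") or {}).get("tradicionales") or []]
--         if s
--     ]
--     return {
--         "tecnicas": [x for i, x in enumerate(flat_t) if flat_t.index(x) == i],
--         "tradicionales": [x for i, x in enumerate(flat_tr) if flat_tr.index(x) == i],
--     }
-- ===== Notes on version B (the rewrite author's own statement) =====
-- stated objective: alternative
-- what changed: Replaces the incremental seen-set bookkeeping with a stateless positional characterization of first occurrences: flatten all stripped non-empty strings per category, then keep an element iff its position equals its first-occurrence index (flat.index(x) == i).
import Mathlib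
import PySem

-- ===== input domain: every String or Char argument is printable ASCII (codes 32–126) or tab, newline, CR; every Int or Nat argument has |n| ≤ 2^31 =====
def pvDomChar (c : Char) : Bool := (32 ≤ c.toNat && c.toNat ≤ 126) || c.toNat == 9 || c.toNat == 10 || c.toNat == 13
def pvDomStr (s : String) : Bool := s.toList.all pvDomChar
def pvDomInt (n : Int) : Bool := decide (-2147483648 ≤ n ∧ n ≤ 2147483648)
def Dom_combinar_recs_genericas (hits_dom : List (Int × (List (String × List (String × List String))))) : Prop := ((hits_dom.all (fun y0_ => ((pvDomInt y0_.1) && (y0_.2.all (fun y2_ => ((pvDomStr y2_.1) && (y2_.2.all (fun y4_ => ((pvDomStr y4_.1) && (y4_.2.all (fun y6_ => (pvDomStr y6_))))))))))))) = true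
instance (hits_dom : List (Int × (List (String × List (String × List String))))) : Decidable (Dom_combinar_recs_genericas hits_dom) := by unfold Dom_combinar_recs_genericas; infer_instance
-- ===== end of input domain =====

-- B drops A's incremental seen-set state entirely: it flattens the stripped non-empty
-- strings per category and keeps an element iff its position is its first-occurrence
-- index (flat.index(x) == i); objective: alternative (stateless characterization).

-- dict lookup on an association list: first match (shared helper of both ports)
def pvDictGet {α : Type} (d : List (String × α)) (k : String) : Option α :=
  (d.find? (fun p => p.1 == k)).map (·.2)

-- ===== PORT A =====
-- A's state: (tecnicas, tradicionales, seen_t, seen_trad)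
abbrev pvStA := List String × List String × PySem.Set String × PySem.Set String

-- body of A's first inner for-loop ('for t in rec.get("tecnicas") or []')
def pvStepT (st : pvStA) (t : String) : pvStA :=
  let t := PySem.Str.strip t
  if t ≠ "" ∧ ¬ (PySem.Set.contains st.2.2.1 t = true) then
    (st.1 ++ [t], st.2.1, PySem.Set.add st.2.2.1 t, st.2.2.2)
  else st

-- body of A's second inner for-loop ('for tr in rec.get("tradicionales") or []')
def pvStepTr (st : pvStA) (tr : String) : pvStA :=
  let tr := PySem.Str.strip tr
  if tr ≠ "" ∧ ¬ (PySem.Set.contains st.2.2.2 tr = true) then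
    (st.1, st.2.1 ++ [tr], st.2.2.1, PySem.Set.add st.2.2.2 tr)
  else st

-- body of A's outer for-loop
def pvStepA (st : pvStA) (h : Int × List (String × List (String × List String))) : pvStA :=
  let rec_ := (pvDictGet h.2 "recomendaciones").getD []
  let st1 := ((pvDictGet rec_ "tecnicas").getD []).foldl pvStepT st
  ((pvDictGet rec_ "tradicionales").getD []).foldl pvStepTr st1

def combinar_recs_genericas (hits_dom : List (Int × (List (String × List (String × List String))))) : List (String × List String) :=
  let st := hits_dom.foldl pvStepA ([], [], PySem.Set.empty, PySem.Set.empty)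
  [("tecnicas", st.1), ("tradicionales", st.2.1)]

-- ===== PORT B =====
-- B's flattening comprehension for one key: stripped strings, empty ones dropped
def pvFlat (hits_dom : List (Int × (List (String × List (String × List String))))) (key : String) : List String :=
  hits_dom.flatMap (fun h =>
    ((((pvDictGet ((pvDictGet h.2 "recomendaciones").getD []) key).getD []).map
        PySem.Str.strip).filter (fun s => s ≠ "")))

-- B's dedup comprehension: [x for i, x in enumerate(flat) if flat.index(x) == i]
def pvFirstOcc (flat : List String) : List String :=
  (PySem.List.enumerate flat).filterMap (fun p =>
    if (PySem.List.index? flat p.2).map (fun k => (k : Int)) = some p.1 then some p.2 else none)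

def combinar_recs_genericas_alt (hits_dom : List (Int × (List (String × List (String × List String))))) : List (String × List String) :=
  let flat_t := pvFlat hits_dom "tecnicas"
  let flat_tr := pvFlat hits_dom "tradicionales"
  [("tecnicas", pvFirstOcc flat_t), ("tradicionales", pvFirstOcc flat_tr)]

-- ===== PRECONDITION & SPEC =====
def Spec_combinar_recs_genericas (hits_dom : List (Int × (List (String × List (String × List String))))) (out : List (String × List String)) : Prop := out = combinar_recs_genericas_alt hits_dom
instance (hits_dom : List (Int × (List (String × List (String × List String))))) (out : List (String × List String)) : Decidable (Spec_combinar_recs_genericas hits_dom out) := by unfold Spec_combinar_recs_genericas; infer_instance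

-- ===== CLAIM (what is proved, stated in full; the proofs are below) =====
def Claim_equal_combinar_recs_genericas : Prop := ∀ (hits_dom : List (Int × (List (String × List (String × List String))))), Dom_combinar_recs_genericas hits_dom → Spec_combinar_recs_genericas hits_dom (combinar_recs_genericas hits_dom)

-- ===== LEMMAS AND PROOFS =====

-- the common "conditionally add the stripped string to a set" step
def pvG (s : PySem.Set String) (t : String) : PySem.Set String :=
  let t := PySem.Str.strip t
  if t ≠ "" then PySem.Set.add s t else s

-- proof-side raw collection (used only to relate the two ports)
def pvStepRaw (acc : List String) (t : String) : List String :=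
  let t := PySem.Str.strip t
  if t ≠ "" then acc ++ [t] else acc

def pvStepB (p : List String × List String)
    (h : Int × List (String × List (String × List String))) :
    List String × List String :=
  let rec_ := (pvDictGet h.2 "recomendaciones").getD []
  (((pvDictGet rec_ "tecnicas").getD []).foldl pvStepRaw p.1,
   ((pvDictGet rec_ "tradicionales").getD []).foldl pvStepRaw p.2)

lemma stepT_eq (s : PySem.Set String) (b : List String) (s' : PySem.Set String) (t : String) :
    pvStepT (s, b, s, s') t = (pvG s t, b, pvG s t, s') := by
  simp only [pvStepT, pvG, PySem.Set.add]
  by_cases h1 : PySem.Str.strip t = ""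
  · simp [h1]
  · by_cases h2 : PySem.Str.strip t ∈ s
    · simp [h1, h2]
    · simp [h1, h2]

lemma stepTr_eq (a : List String) (s s' : PySem.Set String) (t : String) :
    pvStepTr (a, s, s', s) t = (a, pvG s t, s', pvG s t) := by
  simp only [pvStepTr, pvG, PySem.Set.add]
  by_cases h1 : PySem.Str.strip t = ""
  · simp [h1]
  · by_cases h2 : PySem.Str.strip t ∈ s
    · simp [h1, h2]
    · simp [h1, h2]

lemma dedup_stepRaw (r : List String) (t : String) :
    PySem.List.dedup (pvStepRaw r t) = pvG (PySem.List.dedup r) t := by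
  by_cases h1 : PySem.Str.strip t = ""
  · simp [pvStepRaw, pvG, h1]
  · rw [show pvStepRaw r t = r ++ [PySem.Str.strip t] from by simp [pvStepRaw, h1],
        show pvG (PySem.List.dedup r) t
            = PySem.Set.add (PySem.List.dedup r) (PySem.Str.strip t) from by simp [pvG, h1]]
    simp [PySem.List.dedup_eq_ofList, PySem.Set.ofList_eq_foldl, List.foldl_append]

-- A's tecnicas loop, started with tecnicas = seen_t (as lists), is the pure set fold pvG
lemma innerA_tec (ts : List String) (s : PySem.Set String)
    (b : List String) (s' : PySem.Set String) :
    ts.foldl pvStepT (s, b, s, s') = (ts.foldl pvG s, b, ts.foldl pvG s, s') := by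
  induction ts generalizing s with
  | nil => rfl
  | cons t ts ih => rw [List.foldl_cons, stepT_eq, List.foldl_cons]; exact ih (pvG s t)

lemma innerA_trad (ts : List String) (s : PySem.Set String)
    (a : List String) (s' : PySem.Set String) :
    ts.foldl pvStepTr (a, s, s', s) = (a, ts.foldl pvG s, s', ts.foldl pvG s) := by
  induction ts generalizing s with
  | nil => rfl
  | cons t ts ih => rw [List.foldl_cons, stepTr_eq, List.foldl_cons]; exact ih (pvG s t)

-- dedup of B's raw loop = the pure set fold pvG from dedup of the accumulator
lemma innerB (ts : List String) (r : List String) :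
    PySem.List.dedup (ts.foldl pvStepRaw r) = ts.foldl pvG (PySem.List.dedup r) := by
  induction ts generalizing r with
  | nil => rfl
  | cons t ts ih => rw [List.foldl_cons, List.foldl_cons, ← dedup_stepRaw]; exact ih (pvStepRaw r t)

-- outer invariant: A's state is (dedup raw1, dedup raw2, dedup raw1, dedup raw2)
lemma outer (hd : List (Int × (List (String × List (String × List String)))))
    (r1 r2 : List String) :
    hd.foldl pvStepA (PySem.List.dedup r1, PySem.List.dedup r2,
                      PySem.List.dedup r1, PySem.List.dedup r2) =
    (PySem.List.dedup (hd.foldl pvStepB (r1, r2)).1,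
     PySem.List.dedup (hd.foldl pvStepB (r1, r2)).2,
     PySem.List.dedup (hd.foldl pvStepB (r1, r2)).1,
     PySem.List.dedup (hd.foldl pvStepB (r1, r2)).2) := by
  induction hd generalizing r1 r2 with
  | nil => rfl
  | cons h hd ih =>
    rw [List.foldl_cons, List.foldl_cons,
      show pvStepA (PySem.List.dedup r1, PySem.List.dedup r2,
                    PySem.List.dedup r1, PySem.List.dedup r2) h =
          (PySem.List.dedup ((pvStepB (r1, r2) h).1), PySem.List.dedup ((pvStepB (r1, r2) h).2),
           PySem.List.dedup ((pvStepB (r1, r2) h).1), PySem.List.dedup ((pvStepB (r1, r2) h).2))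
        from by
          simp only [pvStepA, pvStepB]
          rw [innerA_tec, innerA_trad, ← innerB, ← innerB]]
    exact ih (pvStepB (r1, r2) h).1 (pvStepB (r1, r2) h).2

-- B's raw inner loop is map-strip-then-filter
lemma raw_eq_filter (ts : List String) (r : List String) :
    ts.foldl pvStepRaw r = r ++ (ts.map PySem.Str.strip).filter (fun s => s ≠ "") := by
  induction ts generalizing r with
  | nil => simp
  | cons t ts ih =>
    rw [List.foldl_cons, ih]
    by_cases h1 : PySem.Str.strip t = "" <;> simp [pvStepRaw, h1]

-- the raw lists of the proof-side fold are B's flattening comprehensions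
lemma rawB_eq_flat (hd : List (Int × (List (String × List (String × List String)))))
    (r1 r2 : List String) :
    hd.foldl pvStepB (r1, r2) = (r1 ++ pvFlat hd "tecnicas", r2 ++ pvFlat hd "tradicionales") := by
  induction hd generalizing r1 r2 with
  | nil => simp [pvFlat]
  | cons h hd ih =>
    rw [List.foldl_cons,
      show pvStepB (r1, r2) h =
        (r1 ++ (((((pvDictGet ((pvDictGet h.2 "recomendaciones").getD []) "tecnicas").getD []).map
            PySem.Str.strip).filter (fun s => s ≠ ""))),
         r2 ++ (((((pvDictGet ((pvDictGet h.2 "recomendaciones").getD []) "tradicionales").getD []).map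
            PySem.Str.strip).filter (fun s => s ≠ "")))) from by
          simp only [pvStepB]; rw [raw_eq_filter, raw_eq_filter],
      ih]
    simp [pvFlat, List.flatMap_cons]

-- generalized: the set fold over a suffix, with the prefix's members already seen,
-- appends exactly the elements sitting at their first-occurrence index of the full list
lemma setfold_firstOcc (xs : List String) : ∀ (pre : List String) (s : PySem.Set String),
    (∀ y, y ∈ s ↔ y ∈ pre) →
    xs.foldl PySem.Set.add s =
      s ++ (PySem.List.enumerate xs (pre.length : Int)).filterMap
        (fun p => if (PySem.List.index? (pre ++ xs) p.2).map (fun k => (k : Int)) = some p.1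
                  then some p.2 else none) := by
  induction xs with
  | nil => intro pre s _; simp [PySem.List.enumerate]
  | cons a xs ih =>
    intro pre s hmem
    rw [List.foldl_cons, PySem.List.enumerate_cons, List.filterMap_cons]
    by_cases ha : a ∈ pre
    · -- a already seen: set unchanged, head not kept
      have hadd : PySem.Set.add s a = s := by
        have : a ∈ s := (hmem a).2 ha
        simp [PySem.Set.add, this]
      have hidx : PySem.List.index? (pre ++ a :: xs) a = PySem.List.index? pre a :=
        PySem.List.index?_append_of_mem _ ha
      have hlt : ∀ k, PySem.List.index? pre a = some k → k < pre.length := by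
        intro k hk
        rcases (PySem.List.index?_eq_some_iff pre a k).1 hk with ⟨p1, p2, hpre, hlen, _⟩
        subst hpre; rw [← hlen]; simp only [List.length_append, List.length_cons]; omega
      have hcond : ¬ ((PySem.List.index? (pre ++ a :: xs) a).map (fun k => (k : Int))
          = some ((pre.length : Nat) : Int)) := by
        rw [hidx]
        intro hc
        cases hx : PySem.List.index? pre a with
        | none => rw [hx] at hc; simp at hc
        | some k =>
          rw [hx] at hc
          simp at hc
          have := hlt k hx
          omega
      rw [if_neg hcond, hadd]
      have hih := ih (pre ++ [a]) s (by
        intro y; rw [hmem y]; simp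
        intro hy; subst hy; exact ha)
      rw [show (pre ++ [a]) ++ xs = pre ++ a :: xs by simp] at hih
      rw [show (((pre ++ [a]).length : Nat) : Int) = (pre.length : Int) + 1 by
        push_cast [List.length_append, List.length_cons, List.length_nil]; ring] at hih
      rw [hih]
    · -- a new: set grows, head kept
      have hadd : PySem.Set.add s a = s ++ [a] := by
        have : a ∉ s := fun h => ha ((hmem a).1 h)
        simp [PySem.Set.add, this]
      have hcond : ((PySem.List.index? (pre ++ a :: xs) a).map (fun k => (k : Int))
          = some ((pre.length : Nat) : Int)) := by
        have : PySem.List.index? (pre ++ a :: xs) a = some pre.length := by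
          rw [PySem.List.index?_eq_some_iff]
          exact ⟨pre, xs, rfl, rfl, ha⟩
        rw [this]; simp
      rw [if_pos hcond, hadd]
      have hih := ih (pre ++ [a]) (s ++ [a]) (by intro y; simp [hmem y])
      rw [show (pre ++ [a]) ++ xs = pre ++ a :: xs by simp] at hih
      rw [show (((pre ++ [a]).length : Nat) : Int) = (pre.length : Int) + 1 by
        push_cast [List.length_append, List.length_cons, List.length_nil]; ring] at hih
      rw [hih]
      simp

-- Python's ordered dedup is B's positional first-occurrence filter
lemma dedup_eq_firstOcc (xs : List String) : PySem.List.dedup xs = pvFirstOcc xs := by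
  have h := setfold_firstOcc xs [] PySem.Set.empty (by intro y; simp [PySem.Set.empty])
  simp only [List.nil_append, List.length_nil, Nat.cast_zero] at h
  rw [PySem.List.dedup_eq_ofList, PySem.Set.ofList_eq_foldl, pvFirstOcc]
  exact h

-- ===== VERDICT (by name: the statement is the Claim_ definition above) =====
theorem combinar_recs_genericas_spec : Claim_equal_combinar_recs_genericas := by
  intro hd _
  show combinar_recs_genericas hd = combinar_recs_genericas_alt hd
  have h := outer hd [] []
  have e : PySem.List.dedup ([] : List String) = [] := rfl
  rw [e] at h
  simp only [combinar_recs_genericas, combinar_recs_genericas_alt]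
  rw [show (PySem.Set.empty : PySem.Set String) = ([] : List String) from rfl, h,
      rawB_eq_flat hd [] []]
  simp only [List.nil_append, dedup_eq_firstOcc]
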